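-- pv_equiv track=rewrite | github.com/stylke/Hetu | examples/lobra/data_utils/gpt_load_dataset.py | _get_length_num_distribution
-- ===== SOURCE A (Python) =====
-- import bisect
--
-- def _get_length_num_distribution(data, min_seq_len=256, max_seq_len=16384, buckets=None):
--     # Get length distribution
--     seq_len_num_distribution = {}
--     for doc_ids in data:
--         sample_len = len(doc_ids)
--         if buckets is None:
--             padded_len = max(min(2 ** (sample_len.bit_length()), max_seq_len), min_seq_len)
--         else:
--             padded_len = buckets[bisect.bisect_left(buckets, sample_len)]
--         seq_len_num_distribution[padded_len] = seq_len_num_distribution.get(padded_len, 0) + 1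
--     seq_len_num_distribution = dict(sorted(seq_len_num_distribution.items(), key=lambda x: x[0]))
--     return seq_len_num_distribution
-- ===== SOURCE B (Python) =====
-- import bisect
--
-- def _get_length_num_distribution(data, min_seq_len=256, max_seq_len=16384, buckets=None):
--     # Map every document to its padded length, SORT the whole list, then count
--     # each run of equal values with a two-pointer scan over the sorted list —
--     # no mutable histogram dict is ever accumulated and no final key-sort is needed,
--     # because runs of a sorted list appear in increasing key order.
--     if buckets is None:
--         padded = [max(min(2 ** len(doc_ids).bit_length(), max_seq_len), min_seq_len)
--                   for doc_ids in data]
--     else: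
--         padded = [buckets[bisect.bisect_left(buckets, len(doc_ids))] for doc_ids in data]
--     padded.sort()
--     result = {}
--     i, n = 0, len(padded)
--     while i < n:
--         j = i
--         while j < n and padded[j] == padded[i]:
--             j += 1
--         result[padded[i]] = j - i
--         i = j
--     return result
-- ===== Notes on version B (the rewrite author's own statement) =====
-- stated objective: alternative
-- what changed: B never accumulates a histogram dict: it maps each document to its padded length, sorts the whole list of padded lengths, and reads the counts off as run lengths of equal values with a two-pointer scan, which yields the result already in increasing key order (sort-then-group vs A's hash accumulation plus final item sort).
import Mathlib
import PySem

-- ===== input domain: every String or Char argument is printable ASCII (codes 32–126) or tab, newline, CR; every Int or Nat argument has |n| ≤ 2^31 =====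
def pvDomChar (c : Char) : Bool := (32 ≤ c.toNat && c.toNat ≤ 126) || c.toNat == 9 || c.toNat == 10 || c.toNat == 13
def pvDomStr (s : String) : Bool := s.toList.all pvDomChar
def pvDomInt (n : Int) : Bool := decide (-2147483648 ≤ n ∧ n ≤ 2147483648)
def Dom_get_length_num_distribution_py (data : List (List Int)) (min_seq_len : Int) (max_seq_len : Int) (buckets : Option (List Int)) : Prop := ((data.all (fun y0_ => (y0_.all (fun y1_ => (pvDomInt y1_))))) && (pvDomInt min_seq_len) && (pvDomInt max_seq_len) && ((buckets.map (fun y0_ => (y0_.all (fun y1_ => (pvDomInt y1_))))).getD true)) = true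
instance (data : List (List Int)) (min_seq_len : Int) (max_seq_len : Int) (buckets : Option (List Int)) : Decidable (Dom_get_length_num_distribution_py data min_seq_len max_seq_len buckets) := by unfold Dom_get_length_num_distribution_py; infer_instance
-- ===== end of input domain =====

-- B replaces A's dict-accumulation histogram by sort-then-group: sort all padded lengths,
-- then count runs of equal values with a two-pointer scan (objective: alternative algorithm).

-- ===== PORT A =====
-- per-element padded length, shared by both Pythons verbatim:
-- None branch: max(min(2 ** sample_len.bit_length(), max_seq_len), min_seq_len);
-- buckets branch: buckets[bisect_left(buckets, sample_len)] (getD 0 is dead under Pre_, which rules out the IndexError).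
def pvPaddedLen (min_seq_len : Int) (max_seq_len : Int) (buckets : Option (List Int)) (sample_len : Nat) : Int :=
  match buckets with
  | none => max (min ((2:Int) ^ PySem.Int.bitLength (sample_len : Int)) max_seq_len) min_seq_len
  | some bs => (PySem.List.pyGet? bs ((PySem.List.bisectLeft bs (sample_len : Int) : Nat) : Int)).getD 0

def get_length_num_distribution_py (data : List (List Int)) (min_seq_len : Int) (max_seq_len : Int) (buckets : Option (List Int)) : List (Int × Int) :=
  let d : PySem.Dict Int Int :=
    data.foldl (fun d doc_ids =>
      let padded_len := pvPaddedLen min_seq_len max_seq_len buckets doc_ids.length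
      d.insert padded_len (d.getD padded_len 0 + 1)) PySem.Dict.empty
  PySem.List.sorted d.items (fun x => x.1)

-- ===== PORT B =====
-- B's inner two-pointer while loop over the sorted list: consume a maximal run of
-- values equal to the head, emit (head, run length), continue after the run.
def pvRunLengths : List Int → List (Int × Int)
  | [] => []
  | x :: xs =>
    (x, ((xs.takeWhile (· == x)).length + 1 : Int)) :: pvRunLengths (xs.dropWhile (· == x))
termination_by l => l.length
decreasing_by
  simpa using Nat.lt_succ_of_le (List.length_dropWhile_le _ _)

def get_length_num_distribution_py_alt (data : List (List Int)) (min_seq_len : Int) (max_seq_len : Int) (buckets : Option (List Int)) : List (Int × Int) :=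
  let padded : List Int := data.map (fun doc_ids => pvPaddedLen min_seq_len max_seq_len buckets doc_ids.length)
  pvRunLengths (PySem.List.sorted padded (fun x => x) false)

-- ===== PRECONDITION & SPEC =====
-- Pre_ excludes exactly the inputs where Python raises IndexError: with buckets given,
-- some document's length lands past the end of buckets under bisect_left (B raises there too).
def Pre_get_length_num_distribution_py (data : List (List Int)) (min_seq_len : Int) (max_seq_len : Int) (buckets : Option (List Int)) : Prop :=
  match buckets with
  | none => True
  | some bs => ∀ doc ∈ data, PySem.List.bisectLeft bs ((doc.length : Nat) : Int) < bs.length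
instance (data : List (List Int)) (min_seq_len : Int) (max_seq_len : Int) (buckets : Option (List Int)) : Decidable (Pre_get_length_num_distribution_py data min_seq_len max_seq_len buckets) := by unfold Pre_get_length_num_distribution_py; cases buckets <;> infer_instance

def pvWitness_get_length_num_distribution_py : List (List Int) × Int × Int × Option (List Int) := ([[1, 2], [], [7, 7, 7]], 2, 8, some [1, 2, 4])

def Spec_get_length_num_distribution_py (data : List (List Int)) (min_seq_len : Int) (max_seq_len : Int) (buckets : Option (List Int)) (out : List (Int × Int)) : Prop := out = get_length_num_distribution_py_alt data min_seq_len max_seq_len buckets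
instance (data : List (List Int)) (min_seq_len : Int) (max_seq_len : Int) (buckets : Option (List Int)) (out : List (Int × Int)) : Decidable (Spec_get_length_num_distribution_py data min_seq_len max_seq_len buckets out) := by unfold Spec_get_length_num_distribution_py; infer_instance

-- ===== CLAIM (what is proved, stated in full; the proofs are below) =====
def Claim_equal_get_length_num_distribution_py : Prop := ∀ (data : List (List Int)) (min_seq_len : Int) (max_seq_len : Int) (buckets : Option (List Int)), Dom_get_length_num_distribution_py data min_seq_len max_seq_len buckets → Pre_get_length_num_distribution_py data min_seq_len max_seq_len buckets → Spec_get_length_num_distribution_py data min_seq_len max_seq_len buckets (get_length_num_distribution_py data min_seq_len max_seq_len buckets)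

-- ===== LEMMAS AND PROOFS =====

-- A's fold over data is the counter of the padded-lengths list
theorem pv_fold_eq_counter (data : List (List Int)) (f : List Int → Int) :
    data.foldl (fun (d : PySem.Dict Int Int) doc => d.insert (f doc) (d.getD (f doc) 0 + 1)) PySem.Dict.empty
      = PySem.Dict.counter (data.map f) := by
  rw [← PySem.Dict.foldl_insert_getD_add_one_eq_counter, List.foldl_map]

-- every element surviving dropWhile (== x) in a sorted list with lower bound x is > x
theorem pv_drop_gt (x : Int) (xs : List Int) (hx : ∀ a ∈ xs, x ≤ a)
    (hxs : xs.Pairwise (· ≤ ·)) : ∀ a ∈ xs.dropWhile (· == x), x < a := by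
  induction xs with
  | nil => simp
  | cons y ys ih =>
    by_cases hy : (y == x) = true
    · rw [List.dropWhile_cons, if_pos hy]
      exact ih (fun a ha => hx a (List.mem_cons_of_mem _ ha)) hxs.tail
    · rw [List.dropWhile_cons, if_neg hy]
      intro a ha
      have hxy : x < y :=
        lt_of_le_of_ne (hx y List.mem_cons_self) (fun h => hy (beq_iff_eq.mpr h.symm))
      rcases List.mem_cons.mp ha with h | h
      · exact h ▸ hxy
      · exact lt_of_lt_of_le hxy ((List.pairwise_cons.mp hxs).1 a h)

-- run-length encoding of a ≤-sorted list is the sorted distinct values paired with counts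
theorem pv_rle_sorted (m : List Int) : m.Pairwise (· ≤ ·) →
    pvRunLengths m
      = (PySem.List.sorted (PySem.Set.ofList m) (fun x => x) false).map
          (fun k => (k, (m.count k : Int))) := by
  induction m using pvRunLengths.induct with
  | case1 =>
    intro _
    have h0 : PySem.List.sorted ([] : List Int) (fun x => x) false = [] :=
      (PySem.List.sorted_eq_nil_iff _ _ _).mpr rfl
    simp [pvRunLengths, h0]
  | case2 x xs ih =>
    intro hm
    have hx : ∀ a ∈ xs, x ≤ a := fun a ha => (List.pairwise_cons.mp hm).1 a ha
    have hxs : xs.Pairwise (· ≤ ·) := hm.tail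
    have hgt : ∀ a ∈ xs.dropWhile (· == x), x < a := pv_drop_gt x xs hx hxs
    have hrest_pw : (xs.dropWhile (· == x)).Pairwise (· ≤ ·) :=
      List.Pairwise.sublist (List.dropWhile_sublist _) hxs
    have htake : ∀ a ∈ xs.takeWhile (· == x), a = x := by
      intro a ha
      simpa using List.mem_takeWhile_imp ha
    have hsplit : xs.takeWhile (· == x) ++ xs.dropWhile (· == x) = xs :=
      List.takeWhile_append_dropWhile
    have hxnotin : x ∉ xs.dropWhile (· == x) := fun h => absurd (hgt x h) (lt_irrefl x)
    -- the sorted distinct values of x::xs are x followed by those of the remainder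
    have hset : PySem.List.sorted (PySem.Set.ofList (x :: xs)) (fun x => x) false
        = x :: PySem.List.sorted (PySem.Set.ofList (xs.dropWhile (· == x))) (fun x => x) false := by
      apply PySem.List.sorted_eq_of_perm_of_pairwise_lt
      · apply (List.perm_ext_iff_of_nodup ?_ (PySem.Set.nodup_ofList _)).mpr
        · intro a
          rw [PySem.Set.mem_ofList, List.mem_cons, List.mem_cons,
            PySem.List.mem_sorted, PySem.Set.mem_ofList]
          constructor
          · rintro (rfl | h)
            · exact Or.inl rfl
            · exact Or.inr ((List.dropWhile_sublist _).subset h)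
          · rintro (rfl | h)
            · exact Or.inl rfl
            · have h2 : a ∈ xs.takeWhile (· == x) ++ xs.dropWhile (· == x) := by
                rw [hsplit]; exact h
              rcases List.mem_append.mp h2 with h' | h'
              · exact Or.inl (htake a h')
              · exact Or.inr h' 
        · refine List.nodup_cons.mpr ⟨?_, ?_⟩
          · intro h
            exact hxnotin ((PySem.Set.mem_ofList _ _).mp ((PySem.List.mem_sorted _ _ _ _).mp h))
          · exact ((PySem.List.sorted_perm _ _ _).nodup_iff).mpr (PySem.Set.nodup_ofList _)
      · refine List.pairwise_cons.mpr ⟨?_, ?_⟩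
        · intro a ha
          exact hgt a ((PySem.Set.mem_ofList _ _).mp ((PySem.List.mem_sorted _ _ _ _).mp ha))
        · exact PySem.List.sorted_ofList_pairwise_lt _
    -- counts
    have hcnt_take : (xs.takeWhile (· == x)).count x = (xs.takeWhile (· == x)).length :=
      List.count_eq_length.mpr (fun b hb => (htake b hb).symm)
    have hxsum : xs.count x = (xs.takeWhile (· == x)).length := by
      conv_lhs => rw [← hsplit]
      rw [List.count_append, hcnt_take, List.count_eq_zero.mpr hxnotin, Nat.add_zero]
    have hcnt_x : (x :: xs).count x = (xs.takeWhile (· == x)).length + 1 := by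
      rw [List.count_cons_self, hxsum]
    have hcnt_rest : ∀ k ∈ xs.dropWhile (· == x),
        (x :: xs).count k = (xs.dropWhile (· == x)).count k := by
      intro k hk
      have hkx : k ≠ x := fun h => absurd (hgt k hk) (by rw [h]; exact lt_irrefl x)
      have h1 : k ∉ xs.takeWhile (· == x) := fun hmem => hkx (htake k hmem)
      have h2 : xs.count k = (xs.dropWhile (· == x)).count k := by
        conv_lhs => rw [← hsplit]
        rw [List.count_append, List.count_eq_zero.mpr h1, Nat.zero_add]
      rw [List.count_cons_of_ne (Ne.symm hkx), h2]
    rw [pvRunLengths, hset, List.map_cons, ih hrest_pw]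
    refine congrArg₂ _ ?_ ?_
    · rw [hcnt_x]
      push_cast
      ring_nf
    · apply List.map_congr_left
      intro k hk
      have hk' : k ∈ xs.dropWhile (· == x) :=
        (PySem.Set.mem_ofList _ _).mp ((PySem.List.mem_sorted _ _ _ _).mp hk)
      rw [hcnt_rest k hk']

-- a Nodup ≤-sorted list is <-sorted
theorem pv_pairwise_lt_of_le_nodup (l : List Int) (h : List.Pairwise (· ≤ ·) l) (hn : l.Nodup) :
    List.Pairwise (· < ·) l :=
  (h.and hn).imp (fun hp => lt_of_le_of_ne hp.1 hp.2)

-- A's sorted Counter items read as counts over the sorted distinct values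
theorem pv_sorted_counter_items (padded : List Int) :
    PySem.List.sorted (PySem.Dict.counter padded).items (fun x => x.1)
      = (PySem.List.sorted (PySem.Set.ofList padded) (fun x => x) false).map
          (fun k => (k, (padded.count k : Int))) := by
  apply PySem.List.sorted_eq_of_perm_of_pairwise_lt
  · rw [PySem.Dict.items_counter]
    exact List.Perm.map _ (PySem.List.sorted_perm (PySem.Set.ofList padded) (fun x => x) false)
  · have hperm := PySem.List.sorted_perm (PySem.Set.ofList padded) (fun x => x) false
    have hnd : (PySem.List.sorted (PySem.Set.ofList padded) (fun x => x) false).Nodup :=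
      hperm.nodup_iff.mpr (PySem.Set.nodup_ofList padded)
    have hlt := pv_pairwise_lt_of_le_nodup _
      (PySem.List.sorted_pairwise (PySem.Set.ofList padded) (fun x => x)) hnd
    exact (List.pairwise_map).mpr (hlt.imp (fun h => h))

-- ===== VERDICT (by name: the statement is the Claim_ definition above) =====
theorem get_length_num_distribution_py_spec : Claim_equal_get_length_num_distribution_py := by
  intro data min_seq_len max_seq_len buckets _ _
  unfold Spec_get_length_num_distribution_py
  simp only [get_length_num_distribution_py, get_length_num_distribution_py_alt]
  rw [pv_fold_eq_counter data (fun doc => pvPaddedLen min_seq_len max_seq_len buckets doc.length)]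
  set padded := data.map (fun doc => pvPaddedLen min_seq_len max_seq_len buckets doc.length) with hp
  set m := PySem.List.sorted padded (fun x => x) false with hmdef
  have hperm : m.Perm padded := PySem.List.sorted_perm _ _ _
  have hsets : PySem.List.sorted (PySem.Set.ofList m) (fun x => x) false
      = PySem.List.sorted (PySem.Set.ofList padded) (fun x => x) false := by
    apply PySem.List.sorted_eq_sorted_of_perm _ _ _ (fun a b h => h)
    apply (List.perm_ext_iff_of_nodup (PySem.Set.nodup_ofList _) (PySem.Set.nodup_ofList _)).mpr
    intro a
    rw [PySem.Set.mem_ofList, PySem.Set.mem_ofList]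
    exact hperm.mem_iff
  rw [pv_sorted_counter_items, pv_rle_sorted m (PySem.List.sorted_pairwise _ _), hsets]
  apply List.map_congr_left
  intro k _
  rw [hperm.count_eq]
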